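-- pv_equiv track=rewrite | github.com/SparkShen02/Solutions-to-Programming-Problems | LeetCode/0065.py | isInteger
-- ===== SOURCE A (Python) =====
-- def isInteger(s):
--     if s == "":
--         return False
--
--     for i in range(0, len(s)):
--         ch = s[i]
--         if ch == '+' or ch == '-':
--             if i != 0 or len(s) == 1: # '+' / '-' is not at the start or s only has '+' / '-'
--                 return False
--         elif ch not in ['0', '1', '2', '3', '4', '5', '6', '7', '8', '9']:
--             return False
--     return True
-- ===== SOURCE B (Python) =====
-- def isInteger(s):
--     body = s[1:] if s[:1] in ('+', '-') else s
--     return bool(body) and set(body) <= set('0123456789')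
-- ===== Notes on version B (the rewrite author's own statement) =====
-- stated objective: alternative
-- what changed: B strips an optional sign by slicing and then decides validity with a set-subset test of the distinct characters of the remainder against the ASCII digit set, instead of A's indexed scan with early returns and a per-position sign test.
import Mathlib
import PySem

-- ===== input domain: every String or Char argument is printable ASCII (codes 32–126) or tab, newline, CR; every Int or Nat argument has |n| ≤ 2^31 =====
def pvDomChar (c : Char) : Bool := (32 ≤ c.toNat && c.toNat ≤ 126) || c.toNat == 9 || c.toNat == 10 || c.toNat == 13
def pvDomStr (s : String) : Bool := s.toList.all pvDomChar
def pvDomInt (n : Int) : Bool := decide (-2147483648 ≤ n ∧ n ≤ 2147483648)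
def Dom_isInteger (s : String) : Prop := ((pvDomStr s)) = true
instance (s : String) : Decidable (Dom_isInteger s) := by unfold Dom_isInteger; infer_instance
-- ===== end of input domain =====

-- B strips an optional sign by slicing and decides validity with a set-subset test over the distinct characters, instead of A's indexed scan with early returns; objective: alternative.


-- ===== PORT A =====
-- A's loop over range(0, len(s)), transliterated as recursion over the char list carrying the index i and len(s).
def isIntegerLoopA (n : Nat) : List Char → Nat → Bool
  | [], _ => true
  | ch :: rest, i =>
    if ch = '+' ∨ ch = '-' then
      if i ≠ 0 ∨ n = 1 then false else isIntegerLoopA n rest (i + 1)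
    else if ch ∈ ['0', '1', '2', '3', '4', '5', '6', '7', '8', '9'] then
      isIntegerLoopA n rest (i + 1)
    else false

def isInteger (s : String) : Bool :=
  let cs := s.toList
  if cs = [] then false else isIntegerLoopA cs.length cs 0

-- ===== PORT B =====
-- B: body = s[1:] if s[:1] in ('+','-') else s; return bool(body) and set(body) <= set('0123456789')
def isInteger_alt (s : String) : Bool :=
  let cs := s.toList
  let body := if cs.take 1 = ['+'] ∨ cs.take 1 = ['-'] then cs.drop 1 else cs
  !body.isEmpty && PySem.Set.issubset (PySem.Set.ofList body) (PySem.Set.ofList "0123456789".toList)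

-- ===== PRECONDITION & SPEC =====
def Spec_isInteger (s : String) (out : Bool) : Prop := out = isInteger_alt s
instance (s : String) (out : Bool) : Decidable (Spec_isInteger s out) := by unfold Spec_isInteger; infer_instance

-- ===== CLAIM (what is proved, stated in full; the proofs are below) =====
def Claim_equal_isInteger : Prop := ∀ (s : String), Dom_isInteger s → Spec_isInteger s (isInteger s)

-- ===== LEMMAS AND PROOFS =====
-- the digit test both programs ultimately decide per character
def isDigitCh (ch : Char) : Bool := ch ∈ ['0', '1', '2', '3', '4', '5', '6', '7', '8', '9']

-- B's set-subset test equals an all-digits check on the list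
theorem subset_eq_all (l : List Char) :
    PySem.Set.issubset (PySem.Set.ofList l) (PySem.Set.ofList "0123456789".toList)
      = l.all isDigitCh := by
  rw [Bool.eq_iff_iff]
  simp [PySem.Set.issubset_iff, PySem.Set.mem_ofList, List.all_eq_true, isDigitCh]

-- Past position 0, A's loop is exactly "all remaining characters are digits".
theorem isIntegerLoopA_tail (n : Nat) (l : List Char) (i : Nat) (hi : i ≠ 0) :
    isIntegerLoopA n l i = l.all isDigitCh := by
  induction l generalizing i with
  | nil => simp [isIntegerLoopA]
  | cons ch rest ih =>
    by_cases hs : ch = '+' ∨ ch = '-'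
    · have hd : isDigitCh ch = false := by
        rcases hs with h | h <;> subst h <;> rfl
      simp [isIntegerLoopA, hs, hi, hd]
    · by_cases hdig : ch ∈ ['0', '1', '2', '3', '4', '5', '6', '7', '8', '9']
      · have hd : isDigitCh ch = true := by simp [isDigitCh, hdig]
        simp [isIntegerLoopA, hs, hd, hdig, ih _ (Nat.succ_ne_zero i)]
      · have hd : isDigitCh ch = false := by simp [isDigitCh]; simpa using hdig
        simp [isIntegerLoopA, hs, hdig, hd]

-- ===== VERDICT (by name: the statement is the Claim_ definition above) =====
theorem isInteger_spec : Claim_equal_isInteger := by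
  intro s _
  unfold Spec_isInteger isInteger isInteger_alt
  cases h : s.toList with
  | nil => simp
  | cons c rest =>
    simp only [List.cons_ne_nil, if_false, List.take, List.drop]
    rw [subset_eq_all]
    by_cases hs : c = '+' ∨ c = '-'
    · cases rest with
      | nil => simp [isIntegerLoopA, hs]
      | cons d rs =>
        have h1 : isIntegerLoopA (c :: d :: rs).length (c :: d :: rs) 0
            = isIntegerLoopA (c :: d :: rs).length (d :: rs) 1 := by
          rw [isIntegerLoopA]; simp [hs]
        rw [h1, isIntegerLoopA_tail _ _ 1 one_ne_zero]
        simp [hs]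
    · by_cases hdig : c ∈ ['0', '1', '2', '3', '4', '5', '6', '7', '8', '9']
      · have hd : isDigitCh c = true := by simp [isDigitCh, hdig]
        have h1 : isIntegerLoopA (c :: rest).length (c :: rest) 0
            = isIntegerLoopA (c :: rest).length rest 1 := by
          rw [isIntegerLoopA]; simp [hs, hdig]
        rw [h1, isIntegerLoopA_tail _ _ 1 one_ne_zero]
        simp [hs, hd]
      · have hd : isDigitCh c = false := by simp [isDigitCh]; simpa using hdig
        have h1 : isIntegerLoopA (c :: rest).length (c :: rest) 0 = false := by
          rw [isIntegerLoopA]; simp [hs, hdig]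
        have hc : ¬ ([c] = ['+'] ∨ [c] = ['-']) := by
          rintro (h' | h') <;> exact hs (by simp at h'; simp [h'])
        rw [h1, if_neg hc]
        simp [hd]
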